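-- pv_equiv track=rewrite | github.com/NGUYEN96Fr/Vis-Priva-Expos | privacy_baseline/libs/preprocess/train_test_split.py | train_minibatches
-- ===== SOURCE A (Python) =====
-- def train_minibatches(training_data, ratios):
--     """Split training data into many training mini batches
--
--     Parameters
--     ----------
--         training_data : dict
--             containing user photos
--                 {user1: {photo1: {class1: [obj1, ...], ...}}, ...}, ...}
--
--         ratios: list of ratios
--             [10, 30, 50 ...,100]
--
--     Results
--     -------
--         minibatches : dict
--             {ratio: {user1: {photo1: {class1: [obj1, ...], ...}}, ...}, ...}, ...}
--
--     """
--     minibatches = {}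
--     N_users =  len(list(training_data.keys())) #nb of users
--
--     for ratio in ratios:
--         minibatches[ratio] = {}
--         nb_img_ratio = int(ratio/100*N_users)
--         k = 0
--         for user, photos in training_data.items():
--             k +=1
--             if k <= nb_img_ratio:
--                 minibatches[ratio][user] = photos
--             else:
--                 break
--
--     return minibatches
-- ===== SOURCE B (Python) =====
-- def train_minibatches(training_data, ratios):
--     """Sort the distinct batch sizes, grow a single running prefix once across them,
--     snapshot each size, then map every ratio to its snapshot."""
--     items = list(training_data.items())
--     N_users = len(items)
--     targets = sorted({int(ratio / 100 * N_users) for ratio in ratios})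
--     snapshots = {}
--     prefix = {}
--     taken = 0
--     for n in targets:
--         while taken < n and taken < N_users:
--             user, photos = items[taken]
--             prefix[user] = photos
--             taken += 1
--         snapshots[n] = dict(prefix)
--     return {ratio: snapshots[int(ratio / 100 * N_users)] for ratio in ratios}
-- ===== Notes on version B (the rewrite author's own statement) =====
-- stated objective: alternative
-- what changed: B sorts the distinct batch sizes int(ratio/100*N), grows a single running prefix dict once across them (snapshotting each size), and maps every ratio to its snapshot, instead of A's fresh counter+break rescan of the user dict for every ratio.
import Mathlib
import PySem

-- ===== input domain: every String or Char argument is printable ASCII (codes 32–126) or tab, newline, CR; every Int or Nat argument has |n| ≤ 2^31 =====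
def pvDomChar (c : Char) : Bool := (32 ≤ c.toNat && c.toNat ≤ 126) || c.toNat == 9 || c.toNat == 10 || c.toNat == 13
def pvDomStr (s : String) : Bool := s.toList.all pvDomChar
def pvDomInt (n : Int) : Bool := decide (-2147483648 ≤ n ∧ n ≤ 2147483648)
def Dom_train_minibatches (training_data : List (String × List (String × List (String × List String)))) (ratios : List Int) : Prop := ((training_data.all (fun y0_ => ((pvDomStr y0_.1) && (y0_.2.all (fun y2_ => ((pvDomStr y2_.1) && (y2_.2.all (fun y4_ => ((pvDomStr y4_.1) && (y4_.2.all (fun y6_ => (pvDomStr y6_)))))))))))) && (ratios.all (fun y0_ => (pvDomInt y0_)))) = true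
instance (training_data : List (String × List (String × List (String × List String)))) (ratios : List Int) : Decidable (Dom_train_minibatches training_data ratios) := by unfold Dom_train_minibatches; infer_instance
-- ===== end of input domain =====

-- B sorts the distinct batch sizes, grows a single running prefix dict once across them with snapshots, then maps each ratio to its snapshot — replacing A's per-ratio counted rescan (objective: alternative); return values proved equal.


-- ===== shared helper: exact binary64 model of the expression `int(ratio/100*N_users)` =====
-- Both Python sources contain this expression verbatim; it is true float division, so it is
-- modelled exactly: round ratio/100 to the nearest double (ties to even), multiply exactly by
-- N_users, round again, truncate toward zero. Exact for all values in the normal double range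
-- (no overflow/subnormals, unreachable on the stated domain).

-- round N/D (D > 0) to the nearest integer, ties to even
def pvRHE (N D : Nat) : Nat :=
  let q := N / D
  let r := N % D
  if 2 * r < D then q else if D < 2 * r then q + 1 else if q % 2 = 0 then q else q + 1

-- round n/(den*2^e) to the nearest integer, ties to even (e may be negative)
def pvRoundAt (n den : Nat) (e : Int) : Nat :=
  if 0 ≤ e then pvRHE n (den * 2 ^ e.toNat) else pvRHE (n * 2 ^ (-e).toNat) den

-- adjust the exponent until the rounded mantissa lands in [2^52, 2^53)
def pvAdj (n den : Nat) : Nat → Int → Nat × Int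
  | 0, e => (pvRoundAt n den e, e)
  | fuel + 1, e =>
    let m := pvRoundAt n den e
    if 2 ^ 53 ≤ m then pvAdj n den fuel (e + 1)
    else if m < 2 ^ 52 then pvAdj n den fuel (e - 1)
    else (m, e)

-- nearest binary64 to num/den (den > 0), as (m, e) with value m * 2^e
def pvRoundD (num : Int) (den : Nat) : Int × Int :=
  if num = 0 then (0, 0)
  else
    let n := num.natAbs
    let e0 : Int := (Nat.log2 n : Int) - (Nat.log2 den : Int) - 52
    let me := pvAdj n den 4 e0
    (if 0 < num then (me.1 : Int) else -(me.1 : Int), me.2)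

-- int(ratio/100*N) with Python float semantics
def pvIntRatioMul (ratio : Int) (N : Nat) : Int :=
  let r1 := pvRoundD ratio 100
  let num := r1.1 * (N : Int)
  let r2 := if 0 ≤ r1.2 then pvRoundD (num * 2 ^ r1.2.toNat) 1 else pvRoundD num (2 ^ (-r1.2).toNat)
  if 0 ≤ r2.2 then r2.1 * 2 ^ r2.2.toNat else Int.tdiv r2.1 (2 ^ (-r2.2).toNat)

-- ===== PORT A =====
-- inner loop: `k += 1; if k <= nb: insert; else: break`
def pvInnerA (nb : Int) :
    List (String × List (String × List (String × List String))) → Int →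
    PySem.Dict String (List (String × List (String × List String))) →
    PySem.Dict String (List (String × List (String × List String)))
  | [], _, acc => acc
  | (u, p) :: rest, k, acc =>
    let k' := k + 1
    if k' ≤ nb then pvInnerA nb rest k' (acc.insert u p) else acc

def train_minibatches (training_data : List (String × List (String × List (String × List String)))) (ratios : List Int) : List (Int × List (String × List (String × List (String × List String)))) :=
  let N_users := (training_data.map (·.1)).length   -- len(list(training_data.keys()))
  let minibatches :=
    ratios.foldl
      (fun (d : PySem.Dict Int (PySem.Dict String (List (String × List (String × List String))))) ratio =>
        let d := d.insert ratio PySem.Dict.empty    -- minibatches[ratio] = {}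
        let nb := pvIntRatioMul ratio N_users
        d.insert ratio (pvInnerA nb training_data 0 PySem.Dict.empty))
      PySem.Dict.empty
  minibatches.items.map (fun p => (p.1, p.2.items))

-- ===== PORT B =====
abbrev pvU := String × List (String × List (String × List String))
abbrev pvSnap := PySem.Dict String (List (String × List (String × List String)))

-- `while taken < n and taken < N_users: user, photos = items[taken]; prefix[user] = photos; taken += 1`
def pvWhileB (items : List pvU) (n : Int) (taken : Nat) (pre : pvSnap) : Nat × pvSnap :=
  if h : (taken : Int) < n ∧ taken < items.length then
    pvWhileB items n (taken + 1) (pre.insert (items[taken]'h.2).1 (items[taken]'h.2).2)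
  else (taken, pre)
termination_by items.length - taken
decreasing_by omega

-- loop body of `for n in targets: ...; snapshots[n] = dict(prefix)` (state: taken, prefix, snapshots)
def pvStepB (items : List pvU) (s : Nat × pvSnap × PySem.Dict Int pvSnap) (n : Int) : Nat × pvSnap × PySem.Dict Int pvSnap :=
  let tp := pvWhileB items n s.1 s.2.1
  (tp.1, tp.2, s.2.2.insert n tp.2)

def train_minibatches_alt (training_data : List (String × List (String × List (String × List String)))) (ratios : List Int) : List (Int × List (String × List (String × List (String × List String)))) :=
  let items := training_data                       -- list(training_data.items())
  let N_users := items.length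
  -- targets = sorted({int(ratio/100*N_users) for ratio in ratios})
  let targets := PySem.List.sorted (PySem.Set.ofList (ratios.map (fun r => pvIntRatioMul r N_users))) (fun x => x) false
  let st := targets.foldl (pvStepB items) (0, PySem.Dict.empty, PySem.Dict.empty)
  let snapshots := st.2.2
  -- {ratio: snapshots[int(ratio/100*N_users)] for ratio in ratios}; the key is always
  -- present (proved below: every target was snapshotted), so the lookup never raises
  let result := ratios.foldl
    (fun (d : PySem.Dict Int pvSnap) r =>
      d.insert r ((snapshots.get? (pvIntRatioMul r N_users)).getD PySem.Dict.empty))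
    PySem.Dict.empty
  result.items.map (fun p => (p.1, p.2.items))

-- ===== PRECONDITION & SPEC =====
def Spec_train_minibatches (training_data : List (String × List (String × List (String × List String)))) (ratios : List Int) (out : List (Int × List (String × List (String × List (String × List String))))) : Prop := out = train_minibatches_alt training_data ratios
instance (training_data : List (String × List (String × List (String × List String)))) (ratios : List Int) (out : List (Int × List (String × List (String × List (String × List String))))) : Decidable (Spec_train_minibatches training_data ratios out) := by
  unfold Spec_train_minibatches
  haveI d5 : DecidableEq (String × List (String × List (String × List String))) := by infer_instance
  haveI d6 : DecidableEq (List (String × List (String × List (String × List String)))) := by infer_instance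
  haveI d7 : DecidableEq (Int × List (String × List (String × List (String × List String)))) := by infer_instance
  infer_instance

-- ===== CLAIM =====
def Claim_equal_train_minibatches : Prop := ∀ (training_data : List (String × List (String × List (String × List String)))) (ratios : List Int), Dom_train_minibatches training_data ratios → Spec_train_minibatches training_data ratios (train_minibatches training_data ratios)

-- ===== LEMMAS AND PROOFS =====

-- A's counted inner loop is a fold over the prefix of length (nb - k)⁺
theorem pvInnerA_eq (nb : Int) :
    ∀ (td : List pvU) (k : Int) (acc : pvSnap),
    pvInnerA nb td k acc = ((td.take (nb - k).toNat).foldl (fun a p => a.insert p.1 p.2) acc) := by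
  intro td
  induction td with
  | nil => intro k acc; simp [pvInnerA]
  | cons hd tl ih =>
    intro k acc
    obtain ⟨u, p⟩ := hd
    by_cases h : k + 1 ≤ nb
    · have h1 : (nb - k).toNat = ((nb - (k + 1)).toNat) + 1 := by omega
      simp [pvInnerA, h, h1, ih]
    · have h0 : (nb - k).toNat = 0 := by omega
      simp [pvInnerA, h, h0]

-- A's per-ratio value, as a dict of a prefix
theorem pvValueA (td : List pvU) (nb : Int) :
    pvInnerA nb td 0 PySem.Dict.empty = PySem.Dict.ofList (td.take nb.toNat) := by
  rw [pvInnerA_eq]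
  simp [PySem.Dict.ofList, PySem.Dict.update]

-- B's while loop: starting from the dict of the first `taken` items, it lands at
-- max taken (min n⁺ N) and yields the dict of that prefix
theorem pvWhileB_spec (items : List pvU) (n : Int) :
    ∀ (fuel taken : Nat), items.length - taken ≤ fuel → taken ≤ items.length →
    pvWhileB items n taken (PySem.Dict.ofList (items.take taken)) =
      (max taken (min n.toNat items.length),
       PySem.Dict.ofList (items.take (max taken (min n.toNat items.length)))) := by
  intro fuel
  induction fuel with
  | zero =>
    intro taken hf hle
    have htk : taken = items.length := by omega
    rw [pvWhileB]
    have hcond : ¬((taken : Int) < n ∧ taken < items.length) := by omega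
    rw [dif_neg hcond]
    have : max taken (min n.toNat items.length) = taken := by omega
    rw [this]
  | succ fuel ih =>
    intro taken hf hle
    rw [pvWhileB]
    by_cases hcond : (taken : Int) < n ∧ taken < items.length
    · rw [dif_pos hcond]
      have hins : (PySem.Dict.ofList (items.take taken)).insert (items[taken]'hcond.2).1 (items[taken]'hcond.2).2
          = PySem.Dict.ofList (items.take (taken + 1)) := by
        have hts : items.take (taken + 1) = items.take taken ++ [items[taken]'hcond.2] := by
          rw [List.take_add_one]
          simp [List.getElem?_eq_getElem hcond.2]
        simp only [PySem.Dict.ofList, PySem.Dict.update]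
        rw [hts, List.foldl_append]
        rfl
      rw [hins, ih (taken + 1) (by omega) (by omega)]
      have hmax : max (taken + 1) (min n.toNat items.length) = max taken (min n.toNat items.length) := by
        omega
      rw [hmax]
    · rw [dif_neg hcond]
      have : max taken (min n.toNat items.length) = taken := by omega
      rw [this]

-- the snapshot fold leaves the entry of any key not in the remaining list untouched
theorem pvFoldB_frozen (items : List pvU) :
    ∀ (ns : List Int) (s : Nat × pvSnap × PySem.Dict Int pvSnap) (k : Int), k ∉ ns →
    ((ns.foldl (pvStepB items) s).2.2).get? k = s.2.2.get? k := by
  intro ns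
  induction ns with
  | nil => intro s k _; rfl
  | cons m t ih =>
    intro s k hk
    have hkm : k ≠ m := by simp at hk; exact hk.1
    have hkt : k ∉ t := by simp at hk; exact hk.2
    rw [List.foldl_cons, ih _ k hkt]
    exact PySem.Dict.get?_insert_of_ne _ _ hkm

-- main invariant: folding the strictly increasing targets records, for each target m,
-- the dict of the first min m⁺ N items
theorem pvFoldB_get? (items : List pvU) :
    ∀ (ns : List Int) (taken : Nat) (snaps : PySem.Dict Int pvSnap),
    taken ≤ items.length → ns.Pairwise (· < ·) →
    (∀ m ∈ ns, taken ≤ min m.toNat items.length) →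
    ∀ m ∈ ns,
      ((ns.foldl (pvStepB items) (taken, PySem.Dict.ofList (items.take taken), snaps)).2.2).get? m
        = some (PySem.Dict.ofList (items.take (min m.toNat items.length))) := by
  intro ns
  induction ns with
  | nil => intro _ _ _ _ _ m hm; cases hm
  | cons m0 t ih =>
    intro taken snaps hle hpw hlo m hm
    have hpw' := (List.pairwise_cons.mp hpw)
    have hstep : pvStepB items (taken, PySem.Dict.ofList (items.take taken), snaps) m0
        = (min m0.toNat items.length,
           PySem.Dict.ofList (items.take (min m0.toNat items.length)),
           snaps.insert m0 (PySem.Dict.ofList (items.take (min m0.toNat items.length)))) := by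
      have h0 : taken ≤ min m0.toNat items.length := hlo m0 (by simp)
      unfold pvStepB
      rw [pvWhileB_spec items m0 (items.length - taken) taken (by omega) hle]
      have : max taken (min m0.toNat items.length) = min m0.toNat items.length := by omega
      rw [this]
    rw [List.foldl_cons, hstep]
    rcases List.mem_cons.mp hm with hm | hm
    · -- m = m0: the entry inserted now is frozen by the rest of the fold
      subst hm
      have hnot : m ∉ t := fun hmem => lt_irrefl m (hpw'.1 m hmem)
      rw [pvFoldB_frozen items t _ m hnot]
      rw [PySem.Dict.get?_insert_self]
    · -- m ∈ t: apply the IH from the new state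
      exact ih (min m0.toNat items.length) _ (by omega) hpw'.2
        (fun m' hm' => by have := hpw'.1 m' hm'; omega) m hm
  
-- ===== VERDICT =====
theorem train_minibatches_spec : Claim_equal_train_minibatches := by
  intro training_data ratios _
  unfold Spec_train_minibatches train_minibatches train_minibatches_alt
  dsimp only
  simp only [List.length_map]
  set N := training_data.length with hN
  set nb := fun r => pvIntRatioMul r N with hnb
  set targets := PySem.List.sorted (PySem.Set.ofList (ratios.map (fun r => nb r))) (fun x => x) false with htg
  have hsnap : ∀ r ∈ ratios,
      (((targets.foldl (pvStepB training_data) (0, PySem.Dict.empty, PySem.Dict.empty)).2.2).get? (nb r)).getD PySem.Dict.empty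
        = PySem.Dict.ofList (training_data.take (nb r).toNat) := by
    intro r hr
    have hmem : nb r ∈ targets := by
      rw [htg, PySem.List.mem_sorted]
      exact (PySem.Set.mem_ofList _ _).mpr (List.mem_map.mpr ⟨r, hr, rfl⟩)
    have hpw : targets.Pairwise (· < ·) := by
      rw [htg]; exact PySem.List.sorted_ofList_pairwise_lt _
    have h0 : PySem.Dict.ofList (training_data.take 0) = (PySem.Dict.empty : pvSnap) := rfl
    have := pvFoldB_get? training_data targets 0 PySem.Dict.empty (by omega) hpw
      (fun m _ => by omega) (nb r) hmem
    rw [h0] at this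
    rw [this]
    simp only [Option.getD_some]
    rw [← List.take_eq_take_min]
  -- the two outer folds over ratios insert equal values for every ratio present
  have hfold :
      ratios.foldl
        (fun (d : PySem.Dict Int pvSnap) ratio =>
          (d.insert ratio PySem.Dict.empty).insert ratio (pvInnerA (nb ratio) training_data 0 PySem.Dict.empty))
        PySem.Dict.empty
      = ratios.foldl
        (fun (d : PySem.Dict Int pvSnap) r =>
          d.insert r ((((targets.foldl (pvStepB training_data) (0, PySem.Dict.empty, PySem.Dict.empty)).2.2).get? (nb r)).getD PySem.Dict.empty))
        PySem.Dict.empty := by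
    apply PySem.List.foldl_congr_mem
    intro acc r hr
    rw [PySem.Dict.insert_insert_self, pvValueA, ← hsnap r hr]
  rw [hfold]
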